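-- pv_equiv track=rewrite | github.com/nunor04/PL2025-A104177 | TPC2/obras.py | process_entries
-- ===== SOURCE A (Python) =====
-- def process_entries(parsed_data):
--     composers_list = []
--     period_counts = {}
--     period_to_titles = {}
--
--     for entry in parsed_data:
--         composer = entry[4].strip()
--         period = entry[3].strip()
--         title = entry[0].strip()
--
--         composers_list.append(composer)
--         period_counts[period] = period_counts.get(period, 0) + 1
--         period_to_titles.setdefault(period, []).append(title)
--
--     return composers_list, period_counts, period_to_titles
-- ===== SOURCE B (Python) =====
-- def process_entries(parsed_data):
--     composers_list = [entry[4].strip() for entry in parsed_data]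
--     pairs = [(entry[3].strip(), entry[0].strip()) for entry in parsed_data]
--
--     periods = []
--     for period, _ in pairs:
--         if period not in periods:
--             periods.append(period)
--
--     period_counts = {p: sum(1 for q, _ in pairs if q == p) for p in periods}
--     period_to_titles = {p: [t for q, t in pairs if q == p] for p in periods}
--     return composers_list, period_counts, period_to_titles
-- ===== Notes on version B (the rewrite author's own statement) =====
-- stated objective: alternative
-- what changed: Instead of one pass maintaining three aggregates via dict mutation, B extracts the (period, title) pairs, dedups the periods in first-appearance order, and then builds counts and title groups by an independent scan of the pairs per distinct period.
import Mathlib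
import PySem

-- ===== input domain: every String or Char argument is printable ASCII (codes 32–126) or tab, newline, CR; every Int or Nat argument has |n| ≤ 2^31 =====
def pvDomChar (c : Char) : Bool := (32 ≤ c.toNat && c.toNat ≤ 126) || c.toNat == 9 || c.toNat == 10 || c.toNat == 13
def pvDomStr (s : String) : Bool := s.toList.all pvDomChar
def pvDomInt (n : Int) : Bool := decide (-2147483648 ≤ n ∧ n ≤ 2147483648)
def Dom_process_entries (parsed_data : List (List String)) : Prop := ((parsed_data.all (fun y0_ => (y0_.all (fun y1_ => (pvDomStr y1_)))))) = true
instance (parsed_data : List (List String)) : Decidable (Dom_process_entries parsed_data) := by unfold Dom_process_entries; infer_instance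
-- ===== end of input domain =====

-- B replaces A's single mutating-dict pass by staged passes: extract (period, title) pairs,
-- dedup the periods in first-appearance order, then count and group by scanning the pairs per period.


-- field accessors shared by both ports (entry[4].strip() / entry[3].strip() / entry[0].strip())
def pvComp (e : List String) : String := PySem.Str.strip (PySem.List.pyGetD e 4 "")
def pvKey (e : List String) : String := PySem.Str.strip (PySem.List.pyGetD e 3 "")
def pvVal (e : List String) : String := PySem.Str.strip (PySem.List.pyGetD e 0 "")

-- ===== PORT A =====
def process_entries (parsed_data : List (List String)) : List String × (List (String × Int)) × (List (String × List String)) :=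
  let st := parsed_data.foldl
    (fun st entry =>
      let composer := pvComp entry
      let period := pvKey entry
      let title := pvVal entry
      (st.1 ++ [composer],
       st.2.1.insert period (st.2.1.getD period 0 + 1),
       st.2.2.modify period [] (· ++ [title])))
    ([], PySem.Dict.empty, PySem.Dict.empty)
  (st.1, st.2.1.items, st.2.2.items)

-- ===== PORT B =====
def process_entries_alt (parsed_data : List (List String)) : List String × (List (String × Int)) × (List (String × List String)) :=
  let composers_list := parsed_data.map pvComp
  let pairs := parsed_data.map (fun e => (pvKey e, pvVal e))
  -- periods: first-appearance dedup of the pair keys ('if period not in periods: periods.append(period)')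
  let periods := pairs.foldl (fun acc q => if acc.contains q.1 then acc else acc ++ [q.1]) ([] : List String)
  -- {p: sum(1 for q, _ in pairs if q == p) for p in periods}
  let period_counts := periods.foldl
    (fun d p => d.insert p ((pairs.countP (fun q => q.1 == p) : Int)))
    (PySem.Dict.empty : PySem.Dict String Int)
  -- {p: [t for q, t in pairs if q == p] for p in periods}
  let period_to_titles := periods.foldl
    (fun d p => d.insert p ((pairs.filter (fun q => q.1 == p)).map (·.2)))
    (PySem.Dict.empty : PySem.Dict String (List String))
  (composers_list, period_counts.items, period_to_titles.items)

-- ===== PRECONDITION & SPEC =====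
-- A indexes entry[4] (and entry[3], entry[0]): Python raises IndexError on an entry with fewer than 5 fields.
def Pre_process_entries (parsed_data : List (List String)) : Prop :=
  ∀ e ∈ parsed_data, 5 ≤ e.length
instance (parsed_data : List (List String)) : Decidable (Pre_process_entries parsed_data) := by unfold Pre_process_entries; infer_instance
def pvWitness_process_entries : List (List String) := [["Title", "x", "y", "Baroque", "Bach"]]

def Spec_process_entries (parsed_data : List (List String)) (out : List String × (List (String × Int)) × (List (String × List String))) : Prop := out = process_entries_alt parsed_data
instance (parsed_data : List (List String)) (out : List String × (List (String × Int)) × (List (String × List String))) : Decidable (Spec_process_entries parsed_data out) := by unfold Spec_process_entries; infer_instance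

-- ===== CLAIM (what is proved, stated in full; the proofs are below) =====
def Claim_equal_process_entries : Prop := ∀ (parsed_data : List (List String)), Dom_process_entries parsed_data → Pre_process_entries parsed_data → Spec_process_entries parsed_data (process_entries parsed_data)

-- ===== LEMMAS AND PROOFS =====

-- A's single fold over a triple splits into three independent folds.
theorem pv_split (l : List (List String)) (c : List String)
    (d : PySem.Dict String Int) (g : PySem.Dict String (List String)) :
    l.foldl
      (fun st entry =>
        (st.1 ++ [pvComp entry],
         st.2.1.insert (pvKey entry) (st.2.1.getD (pvKey entry) 0 + 1),
         st.2.2.modify (pvKey entry) [] (· ++ [pvVal entry])))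
      (c, d, g)
    = (c ++ l.map pvComp,
       l.foldl (fun d e => d.insert (pvKey e) (d.getD (pvKey e) 0 + 1)) d,
       l.foldl (fun g e => g.modify (pvKey e) [] (· ++ [pvVal e])) g) := by
  induction l generalizing c d g with
  | nil => simp
  | cons e rest ih => simp [List.foldl_cons, ih]

theorem process_entries_spec_aux (parsed_data : List (List String)) :
    process_entries parsed_data = process_entries_alt parsed_data := by
  unfold process_entries process_entries_alt
  rw [pv_split]
  dsimp only
  set pairs := parsed_data.map (fun e => (pvKey e, pvVal e)) with hpairs
  have hks : pairs.map (·.1) = parsed_data.map pvKey := by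
    simp [hpairs, List.map_map, Function.comp_def]
  -- the dedup fold is Set.ofList of the keys
  have hperiods : pairs.foldl (fun acc q => if acc.contains q.1 then acc else acc ++ [q.1]) ([] : List String)
      = PySem.Set.ofList (parsed_data.map pvKey) := by
    have hfun : (fun (acc : List String) (q : String × String) =>
        if acc.contains q.1 then acc else acc ++ [q.1])
        = fun acc q => PySem.Set.add acc q.1 := by
      funext acc q; simp [PySem.Set.add]
    rw [hfun, ← PySem.Set.update_map_eq_foldl_add, hks, PySem.Set.update_nil_left]
  have hA : parsed_data.foldl
      (fun d e => d.insert (pvKey e) (d.getD (pvKey e) 0 + 1)) PySem.Dict.empty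
      = PySem.Dict.counter (parsed_data.map pvKey) := by
    rw [← PySem.Dict.foldl_insert_getD_add_one_eq_counter, List.foldl_map]
  rw [hA, PySem.Dict.items_counter, hperiods]
  rw [PySem.Dict.items_foldl_insert_fresh (l := PySem.Set.ofList (parsed_data.map pvKey))
        (k := fun p => p) (v := fun p => ((pairs.countP (fun q => q.1 == p) : Int)))
        (d := PySem.Dict.empty)
        (fun a _ => PySem.Dict.contains_empty a)
        (by simp)]
  rw [PySem.Dict.items_foldl_insert_fresh (l := PySem.Set.ofList (parsed_data.map pvKey))
        (k := fun p => p) (v := fun p => (pairs.filter (fun q => q.1 == p)).map (·.2))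
        (d := PySem.Dict.empty)
        (fun a _ => PySem.Dict.contains_empty a)
        (by simp)]
  -- A's group dict: rewrite to the pair fold, then items via keys and per-key lookup
  have hG : parsed_data.foldl
      (fun g e => g.modify (pvKey e) [] (· ++ [pvVal e])) PySem.Dict.empty
      = pairs.foldl (fun d q => d.modify q.1 [] (· ++ [q.2])) PySem.Dict.empty := by
    rw [hpairs, List.foldl_map]
  have hkeys : (pairs.foldl (fun d q => d.modify q.1 [] (· ++ [q.2]))
      (PySem.Dict.empty : PySem.Dict String (List String))).keys
      = PySem.Set.ofList (parsed_data.map pvKey) := by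
    rw [PySem.Dict.keys_foldl_modify_key pairs (·.1)]
    simp [PySem.Dict.keys_empty, PySem.Set.update_nil_left, hks]
  have hnd : (pairs.foldl (fun d q => d.modify q.1 [] (· ++ [q.2]))
      (PySem.Dict.empty : PySem.Dict String (List String))).keys.Nodup := by
    rw [hkeys]; exact PySem.Set.nodup_ofList _
  rw [hG, PySem.Dict.items_eq_map_keys _ hnd [], hkeys]
  simp only [show (PySem.Dict.empty : PySem.Dict String Int).items = [] from rfl,
    show (PySem.Dict.empty : PySem.Dict String (List String)).items = [] from rfl,
    List.nil_append]
  refine congrArg₂ Prod.mk rfl (congrArg₂ Prod.mk ?_ ?_)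
  · apply List.map_congr_left
    intro p _
    have : (parsed_data.map pvKey).count p = pairs.countP (fun q => q.1 == p) := by
      rw [← hks, List.count_eq_countP, List.countP_map]; rfl
    simp [this]
  · apply List.map_congr_left
    intro p _
    rw [PySem.Dict.getD_foldl_modify_append]
    simp

-- ===== VERDICT (by name: the statement is the Claim_ definition above) =====
theorem process_entries_spec : Claim_equal_process_entries := by
  intro parsed_data _ _
  unfold Spec_process_entries
  exact process_entries_spec_aux parsed_data
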